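-- pv_equiv track=rewrite | github.com/riceriley59/CS-325 | HW4/nbest.py | nbestc
-- ===== SOURCE A (Python) =====
-- import heapq
--
-- def nbestc(A, B):
--     n = len(A)
--     res = []
--     heap = [(A[0] + B[j], 0, j) for j in range(n)]
--     heapq.heapify(heap)
--     visited = set((0, j) for j in range(n))
--     while len(res) < n:
--         s, i, j = heapq.heappop(heap)
--         res.append((A[i], B[j]))
--         if i+1 < n and (i+1, j) not in visited:
--             heapq.heappush(heap, (A[i+1] + B[j], i+1, j))
--             visited.add((i+1, j))
--         if j+1 < n and (i, j+1) not in visited: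
--             heapq.heappush(heap, (A[i] + B[j+1], i, j+1))
--             visited.add((i, j+1))
--     return res
-- ===== SOURCE B (Python) =====
-- def nbestc(A, B):
--     # Same best-first selection as the heap version, but stateless per step:
--     # rebuild the candidate frontier of the chosen region from scratch each round
--     # and take its minimum (sum, i, j) cell; no heap, no visited bookkeeping.
--     n = len(A)
--     chosen = set()
--     res = []
--     while len(res) < n:
--         cand = {(0, j) for j in range(n)}
--         cand |= {(i + 1, j) for (i, j) in chosen}
--         cand |= {(i, j + 1) for (i, j) in chosen}
--         cand -= chosen
--         _, i, j = min((A[i] + B[j], i, j) for (i, j) in cand if i < n and j < n)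
--         chosen.add((i, j))
--         res.append((A[i], B[j]))
--     return res
-- ===== Notes on version B (the rewrite author's own statement) =====
-- stated objective: simpler
-- what changed: Replaces the heapq priority queue and incremental visited-set bookkeeping with a stateless per-step recomputation: each round rebuilds the candidate frontier of the chosen region from the chosen set alone (row 0 plus its down/right shifts, minus chosen) and takes its minimum (sum, i, j) cell.
import Mathlib
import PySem

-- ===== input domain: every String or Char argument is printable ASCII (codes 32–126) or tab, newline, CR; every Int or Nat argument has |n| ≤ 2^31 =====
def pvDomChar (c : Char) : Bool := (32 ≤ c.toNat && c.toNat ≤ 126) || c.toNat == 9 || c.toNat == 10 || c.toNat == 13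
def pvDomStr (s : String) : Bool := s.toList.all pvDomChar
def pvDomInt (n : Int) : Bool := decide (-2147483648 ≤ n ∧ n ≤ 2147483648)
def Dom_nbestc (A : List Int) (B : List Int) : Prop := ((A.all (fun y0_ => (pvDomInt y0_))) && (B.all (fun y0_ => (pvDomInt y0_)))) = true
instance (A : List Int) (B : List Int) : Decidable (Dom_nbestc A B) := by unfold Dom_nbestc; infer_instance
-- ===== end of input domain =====

-- B replaces A's incremental heap + visited-set bookkeeping by a stateless per-step
-- recomputation: each round it rebuilds the frontier of the chosen region and takes its
-- minimum (sum, i, j) cell. Same return value; objective: simpler state, not speed.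

-- Shared library model: Python's tuple comparison on (sum, i, j) triples (lexicographic ≤).
def lexLE (x y : Int × Int × Int) : Bool :=
  decide (x.1 < y.1 ∨ (x.1 = y.1 ∧ (x.2.1 < y.2.1 ∨ (x.2.1 = y.2.1 ∧ x.2.2 ≤ y.2.2))))

-- Models both builtin min() on (int, int, int) tuples (first extremal kept, as Python)
-- and heapq's pop order: every (s, i, j) in a heap/candidate pool here has a distinct
-- (i, j), so the lex-least element is the unique value heappop returns.
def pyMinTriple : List (Int × Int × Int) → Option (Int × Int × Int)
  | [] => none
  | x :: xs => some (xs.foldl (fun m y => if lexLE m y then m else y) x)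

-- ===== PORT A =====
-- 'while len(res) < n': every iteration appends exactly one pair, so from res = [] the
-- loop runs exactly n iterations: ported as fuel = n.toNat.  heapq.heapify reorders the
-- list but is a multiset identity, and heappop removes the lex-least triple (exact here,
-- see pyMinTriple above); list indexing A[i]/B[j] is pyGetD (in range inside Pre_).
def nbestcLoop (A B : List Int) (n : Int) :
    Nat → List (Int × Int) → List (Int × Int × Int) → PySem.Set (Int × Int) → List (Int × Int)
  | 0, res, _, _ => res
  | Nat.succ fuel, res, heap, vis =>
    match pyMinTriple heap with
    | none => res   -- heappop on an empty heap raises; never reached from nbestc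
    | some (s, i, j) =>
      let heap1 := heap.erase (s, i, j)
      let res1 := res ++ [(PySem.List.pyGetD A i 0, PySem.List.pyGetD B j 0)]
      let p1 : Bool := decide (i + 1 < n) && !(PySem.Set.contains vis (i + 1, j))
      let heap2 := if p1 then heap1 ++ [(PySem.List.pyGetD A (i + 1) 0 + PySem.List.pyGetD B j 0, i + 1, j)] else heap1
      let vis2 := if p1 then PySem.Set.add vis (i + 1, j) else vis
      let p2 : Bool := decide (j + 1 < n) && !(PySem.Set.contains vis2 (i, j + 1))
      let heap3 := if p2 then heap2 ++ [(PySem.List.pyGetD A i 0 + PySem.List.pyGetD B (j + 1) 0, i, j + 1)] else heap2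
      let vis3 := if p2 then PySem.Set.add vis2 (i, j + 1) else vis2
      nbestcLoop A B n fuel res1 heap3 vis3

def nbestc (A : List Int) (B : List Int) : List (Int × Int) :=
  let n : Int := A.length
  let heap := (PySem.List.pyRange 0 n 1).map
    (fun j => (PySem.List.pyGetD A 0 0 + PySem.List.pyGetD B j 0, (0 : Int), j))
  let vis := PySem.Set.ofList ((PySem.List.pyRange 0 n 1).map (fun j => ((0 : Int), j)))
  nbestcLoop A B n n.toNat [] heap vis

-- ===== PORT B =====
-- the candidate pool rebuilt each round, as Python's set algebra: row 0, plus the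
-- down/right shifts of the chosen set, minus the chosen set
def candCells (n : Int) (chosen : PySem.Set (Int × Int)) : PySem.Set (Int × Int) :=
  PySem.Set.diff
    (PySem.Set.union
      (PySem.Set.union
        (PySem.Set.ofList ((PySem.List.pyRange 0 n 1).map (fun j => ((0 : Int), j))))
        (chosen.map (fun p => (p.1 + 1, p.2))))
      (chosen.map (fun p => (p.1, p.2 + 1))))
    chosen

-- the generator feeding min(): the candidate cells kept inside the grid, as triples
def candList (A B : List Int) (n : Int) (chosen : PySem.Set (Int × Int)) : List (Int × Int × Int) :=
  (candCells n chosen).filterMap fun p =>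
    if decide (p.1 < n) && decide (p.2 < n) then
      some (PySem.List.pyGetD A p.1 0 + PySem.List.pyGetD B p.2 0, p.1, p.2)
    else none

def nbestcAltLoop (A B : List Int) (n : Int) :
    Nat → PySem.Set (Int × Int) → List (Int × Int) → List (Int × Int)
  | 0, _, res => res
  | Nat.succ fuel, chosen, res =>
    match pyMinTriple (candList A B n chosen) with
    | none => res   -- min() of an empty generator raises; never reached from nbestc_alt
    | some (_s, i, j) =>
      nbestcAltLoop A B n fuel (PySem.Set.add chosen (i, j))
        (res ++ [(PySem.List.pyGetD A i 0, PySem.List.pyGetD B j 0)])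

def nbestc_alt (A : List Int) (B : List Int) : List (Int × Int) :=
  nbestcAltLoop A B (A.length : Int) ((A.length : Int)).toNat PySem.Set.empty []

-- ===== PRECONDITION & SPEC =====
-- Pre_ excludes exactly the inputs where Python A raises: with 0 < len(A), building the
-- first heap row indexes B[j] for every j < len(A), an IndexError when len(B) < len(A).
def Pre_nbestc (A : List Int) (B : List Int) : Prop := A.length ≤ B.length
instance (A : List Int) (B : List Int) : Decidable (Pre_nbestc A B) := by unfold Pre_nbestc; infer_instance
def pvWitness_nbestc : List Int × List Int := ([1, 2], [1, 3])

def Spec_nbestc (A : List Int) (B : List Int) (out : List (Int × Int)) : Prop := out = nbestc_alt A B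
instance (A : List Int) (B : List Int) (out : List (Int × Int)) : Decidable (Spec_nbestc A B out) := by unfold Spec_nbestc; infer_instance

-- ===== CLAIM (what is proved, stated in full; the proofs are below) =====
def Claim_equal_nbestc : Prop := ∀ (A : List Int) (B : List Int), Dom_nbestc A B → Pre_nbestc A B → Spec_nbestc A B (nbestc A B)

-- ===== LEMMAS AND PROOFS =====
-- (the equality of the two loops holds in fact for all inputs; Pre_ is needed only for
-- the ports to be faithful to the Pythons, which raise when len(B) < len(A) > 0)

lemma lexLE_refl (x : Int × Int × Int) : lexLE x x = true := by
  simp [lexLE]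
lemma lexLE_total (x y : Int × Int × Int) : lexLE x y ∨ lexLE y x := by
  obtain ⟨a, b, c⟩ := x; obtain ⟨d, e, f⟩ := y
  simp only [lexLE, decide_eq_true_eq]; omega
lemma lexLE_trans {x y z : Int × Int × Int} (h1 : lexLE x y) (h2 : lexLE y z) : lexLE x z = true := by
  obtain ⟨a, b, c⟩ := x; obtain ⟨d, e, f⟩ := y; obtain ⟨g, p, q⟩ := z
  simp only [lexLE, decide_eq_true_eq] at *; omega
lemma lexLE_antisymm {x y : Int × Int × Int} (h1 : lexLE x y) (h2 : lexLE y x) : x = y := by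
  simp only [lexLE, decide_eq_true_eq] at h1 h2
  obtain ⟨a, b, c⟩ := x; obtain ⟨d, e, f⟩ := y
  simp_all only [Prod.mk.injEq]; omega

lemma foldl_min_spec (xs : List (Int × Int × Int)) (a : Int × Int × Int) :
    (xs.foldl (fun m y => if lexLE m y then m else y) a = a ∨
      xs.foldl (fun m y => if lexLE m y then m else y) a ∈ xs) ∧
    lexLE (xs.foldl (fun m y => if lexLE m y then m else y) a) a = true ∧
    ∀ y ∈ xs, lexLE (xs.foldl (fun m y => if lexLE m y then m else y) a) y = true := by
  induction xs generalizing a with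
  | nil => simp [lexLE_refl]
  | cons x xs ih =>
    simp only [List.foldl_cons]
    obtain ⟨hmem, hle, hall⟩ := ih (if lexLE a x then a else x)
    have hstep_a : lexLE (if lexLE a x then a else x) a = true := by
      by_cases h : lexLE a x = true
      · simp [h, lexLE_refl]
      · rcases lexLE_total a x with h' | h'
        · exact absurd h' h
        · simpa [h] using h'
    have hstep_x : lexLE (if lexLE a x then a else x) x = true := by
      by_cases h : lexLE a x = true
      · rw [if_pos h]; exact h
      · simp [h, lexLE_refl]
    refine ⟨?_, ?_, ?_⟩
    · rcases hmem with h | h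
      · rw [h]; by_cases h2 : lexLE a x = true <;> simp [h2]
      · simp [h]
    · exact lexLE_trans hle hstep_a
    · intro y hy
      rcases List.mem_cons.mp hy with rfl | hy'
      · exact lexLE_trans hle hstep_x
      · exact hall y hy'

lemma pyMinTriple_spec (l : List (Int × Int × Int)) :
    match pyMinTriple l with
    | none => l = []
    | some m => m ∈ l ∧ ∀ y ∈ l, lexLE m y := by
  cases l with
  | nil => simp [pyMinTriple]
  | cons x xs =>
    simp only [pyMinTriple]
    obtain ⟨hmem, hle, hall⟩ := foldl_min_spec xs x
    refine ⟨?_, ?_⟩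
    · rcases hmem with h | h
      · simp [h]
      · simp [h]
    · intro y hy
      rcases List.mem_cons.mp hy with rfl | hy'
      · exact hle
      · exact hall y hy'

lemma pyMinTriple_eq_none {l : List (Int × Int × Int)} (h : pyMinTriple l = none) : l = [] := by
  have := pyMinTriple_spec l; rw [h] at this; exact this

lemma pyMinTriple_eq_some {l : List (Int × Int × Int)} {m} (h : pyMinTriple l = some m) :
    m ∈ l ∧ ∀ y ∈ l, lexLE m y := by
  have := pyMinTriple_spec l; rw [h] at this; exact this

lemma pyMinTriple_congr {l1 l2 : List (Int × Int × Int)} (h : ∀ x, x ∈ l1 ↔ x ∈ l2) :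
    pyMinTriple l1 = pyMinTriple l2 := by
  cases h1 : pyMinTriple l1 with
  | none =>
    cases h2 : pyMinTriple l2 with
    | none => rfl
    | some m2 =>
      have e1 := pyMinTriple_eq_none h1
      have e2 := pyMinTriple_eq_some h2
      subst e1; exact absurd ((h m2).mpr e2.1) (List.not_mem_nil)
  | some m1 =>
    cases h2 : pyMinTriple l2 with
    | none =>
      have e2 := pyMinTriple_eq_none h2
      have e1 := pyMinTriple_eq_some h1
      subst e2; exact absurd ((h m1).mp e1.1) (List.not_mem_nil)
    | some m2 =>
      have e1 := pyMinTriple_eq_some h1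
      have e2 := pyMinTriple_eq_some h2
      have := lexLE_antisymm (e1.2 m2 ((h m2).mpr e2.1)) (e2.2 m1 ((h m1).mp e1.1))
      rw [this]

lemma contains_false {α : Type} [BEq α] [LawfulBEq α] (s : PySem.Set α) (x : α) :
    (PySem.Set.contains s x = false) ↔ x ∉ s := by
  rw [← PySem.Set.contains_iff]; simp

-- the frontier of the chosen region: unchosen in-bounds cells whose up/left neighbour
-- is chosen (row 0 is always enabled)
def pvFrontier (n : Int) (ch : List (Int × Int)) (i j : Int) : Prop :=
  0 ≤ i ∧ i < n ∧ 0 ≤ j ∧ j < n ∧ (i, j) ∉ ch ∧ (i = 0 ∨ (i - 1, j) ∈ ch ∨ (i, j - 1) ∈ ch)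

-- the A-state (heap, vis) and the B-state (ch) describe the same search state
def pvInv (A B : List Int) (n : Int) (heap : List (Int × Int × Int)) (vis ch : List (Int × Int)) : Prop :=
  (∀ s i j, (s, i, j) ∈ heap ↔ pvFrontier n ch i j ∧ s = PySem.List.pyGetD A i 0 + PySem.List.pyGetD B j 0) ∧
  (∀ i j, (i, j) ∈ vis ↔ (i, j) ∈ ch ∨ pvFrontier n ch i j) ∧
  (heap.map (fun t => (t.2.1, t.2.2))).Nodup ∧
  (∀ p ∈ ch, 0 ≤ (p : Int × Int).1 ∧ p.1 < n ∧ 0 ≤ p.2 ∧ p.2 < n)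

lemma mem_candList (A B : List Int) (n : Int) (ch : PySem.Set (Int × Int))
    (hbnd : ∀ p ∈ ch, 0 ≤ (p : Int × Int).1 ∧ p.1 < n ∧ 0 ≤ p.2 ∧ p.2 < n) (s i j : Int) :
    (s, i, j) ∈ candList A B n ch ↔
      pvFrontier n ch i j ∧ s = PySem.List.pyGetD A i 0 + PySem.List.pyGetD B j 0 := by
  simp only [candList, candCells, List.mem_filterMap, PySem.Set.mem_diff, PySem.Set.mem_union,
    PySem.Set.mem_ofList, List.mem_map, PySem.List.mem_pyRange_one, pvFrontier]
  constructor
  · rintro ⟨⟨x, y⟩, ⟨hin, hnotch⟩, hif⟩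
    split at hif
    · rename_i hcond
      simp only [Bool.and_eq_true, decide_eq_true_eq] at hcond
      simp only [Option.some.injEq, Prod.mk.injEq] at hif
      obtain ⟨hse, hxe, hye⟩ := hif
      subst hxe; subst hye; subst hse
      rcases hin with (⟨j', ⟨h0, h1⟩, he⟩ | ⟨⟨a, b⟩, hab, he⟩) | ⟨⟨a, b⟩, hab, he⟩
      · injection he with e1 e2
        subst e1; subst e2
        exact ⟨⟨le_refl 0, hcond.1, h0, h1, hnotch, Or.inl rfl⟩, rfl⟩
      · injection he with e1 e2
        subst e1; subst e2
        obtain ⟨b1, b2, b3, b4⟩ := hbnd (a, b) hab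
        refine ⟨⟨by omega, hcond.1, b3, b4, hnotch, Or.inr (Or.inl ?_)⟩, rfl⟩
        have ha : (a + 1 - 1 : Int) = a := by omega
        rw [ha]; exact hab
      · injection he with e1 e2
        subst e1; subst e2
        obtain ⟨b1, b2, b3, b4⟩ := hbnd (a, b) hab
        refine ⟨⟨b1, b2, by omega, hcond.2, hnotch, Or.inr (Or.inr ?_)⟩, rfl⟩
        have hb : (b + 1 - 1 : Int) = b := by omega
        rw [hb]; exact hab
    · exact absurd hif (by simp)
  · rintro ⟨⟨hi0, hin', hj0, hjn, hnm, hen⟩, rfl⟩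
    refine ⟨(i, j), ⟨?_, hnm⟩, ?_⟩
    · rcases hen with rfl | h | h
      · exact Or.inl (Or.inl ⟨j, ⟨hj0, hjn⟩, rfl⟩)
      · refine Or.inl (Or.inr ⟨(i - 1, j), h, ?_⟩)
        have : (i - 1 + 1 : Int) = i := by omega
        rw [this]
      · refine Or.inr ⟨(i, j - 1), h, ?_⟩
        have : (j - 1 + 1 : Int) = j := by omega
        rw [this]
    · rw [if_pos]
      simp only [Bool.and_eq_true, decide_eq_true_eq]
      exact ⟨hin', hjn⟩

lemma frontier_step (n : Int) (ch : PySem.Set (Int × Int)) (i j x y : Int)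
    (hf : pvFrontier n ch i j) :
    pvFrontier n (PySem.Set.add ch (i, j)) x y ↔
      (pvFrontier n ch x y ∧ (x, y) ≠ (i, j)) ∨
      ((x, y) = (i + 1, j) ∧ i + 1 < n ∧ (i + 1, j) ∉ ch ∧ ¬ pvFrontier n ch (i + 1) j) ∨
      ((x, y) = (i, j + 1) ∧ j + 1 < n ∧ (i, j + 1) ∉ ch ∧ ¬ pvFrontier n ch i (j + 1)) := by
  obtain ⟨hi0, hin, hj0, hjn, hnm, hen⟩ := hf
  simp only [pvFrontier, PySem.Set.mem_add, Prod.mk.injEq, ne_eq]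
  by_cases e1 : x = i + 1 ∧ y = j
  · obtain ⟨ex, ey⟩ := e1
    rw [ex, ey]
    constructor
    · rintro ⟨h1, h2, h3, h4, h5, h6⟩
      push_neg at h5
      by_cases hP : (i + 1, j) ∈ ch ∨ ¬ (i + 1 < n)
      · rcases hP with hP | hP
        · exact absurd hP h5.1
        · exact absurd h2 hP
      · push_neg at hP
        by_cases hF : (i + 1 = 0 ∨ (i + 1 - 1, j) ∈ ch ∨ (i + 1, j - 1) ∈ ch) ∧ (i+1,j) ∉ ch
        · exact Or.inl ⟨⟨h1, h2, h3, h4, hF.2, hF.1⟩, by omega⟩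
        · refine Or.inr (Or.inl ⟨⟨rfl, rfl⟩, hP.2, hP.1, ?_⟩)
          rintro ⟨_, _, _, _, hc5, hc6⟩
          exact hF ⟨hc6, hc5⟩
    · rintro (⟨⟨h1, h2, h3, h4, h5, h6⟩, hne⟩ | ⟨_, h2, h3, h4⟩ | ⟨⟨e, e'⟩, _⟩)
      · refine ⟨h1, h2, h3, h4, ?_, ?_⟩
        · push_neg; exact ⟨h5, fun h _ => by omega⟩
        · tauto
      · refine ⟨by omega, h2, hj0, hjn, ?_, ?_⟩
        · push_neg; exact ⟨h3, fun h _ => by omega⟩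
        · right; left; right; constructor <;> omega
      · omega
  · by_cases e2 : x = i ∧ y = j + 1
    · obtain ⟨ex, ey⟩ := e2
      rw [ex, ey]
      constructor
      · rintro ⟨h1, h2, h3, h4, h5, h6⟩
        push_neg at h5
        by_cases hP : (i, j + 1) ∈ ch ∨ ¬ (j + 1 < n)
        · rcases hP with hP | hP
          · exact absurd hP h5.1
          · exact absurd h4 hP
        · push_neg at hP
          by_cases hF : (i = 0 ∨ (i - 1, j + 1) ∈ ch ∨ (i, j + 1 - 1) ∈ ch) ∧ (i, j+1) ∉ ch
          · exact Or.inl ⟨⟨h1, h2, h3, h4, hF.2, hF.1⟩, by omega⟩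
          · refine Or.inr (Or.inr ⟨⟨rfl, rfl⟩, hP.2, hP.1, ?_⟩)
            rintro ⟨_, _, _, _, hc5, hc6⟩
            exact hF ⟨hc6, hc5⟩
      · rintro (⟨⟨h1, h2, h3, h4, h5, h6⟩, hne⟩ | ⟨⟨e, e'⟩, _⟩ | ⟨_, h2, h3, h4⟩)
        · refine ⟨h1, h2, h3, h4, ?_, ?_⟩
          · push_neg; exact ⟨h5, fun h _ => by omega⟩
          · tauto
        · omega
        · refine ⟨hi0, hin, by omega, h2, ?_, ?_⟩
          · push_neg; exact ⟨h3, fun h _ => by omega⟩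
          · right; right; right; constructor <;> omega
    · -- x,y is neither pushed neighbour
      constructor
      · rintro ⟨h1, h2, h3, h4, h5, h6⟩
        push_neg at h5
        by_cases ec : x = i ∧ y = j
        · exact absurd ec.2 (h5.2 ec.1)
        · refine Or.inl ⟨⟨h1, h2, h3, h4, h5.1, ?_⟩, by tauto⟩
          rcases h6 with h | h | h
          · exact Or.inl h
          · rcases h with h | h
            · exact Or.inr (Or.inl h)
            · exact absurd ⟨by omega, h.2⟩ e1
          · rcases h with h | h
            · exact Or.inr (Or.inr h)
            · exact absurd ⟨h.1, by omega⟩ e2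
      · rintro (⟨⟨h1, h2, h3, h4, h5, h6⟩, hne⟩ | ⟨⟨e, e'⟩, _⟩ | ⟨⟨e, e'⟩, _⟩)
        · refine ⟨h1, h2, h3, h4, ?_, by tauto⟩
          push_neg; exact ⟨h5, fun h h' => hne ⟨h, h'⟩⟩
        · exact absurd ⟨e, e'⟩ e1
        · exact absurd ⟨e, e'⟩ e2

set_option maxHeartbeats 1000000 in
lemma loop_eq (A B : List Int) (n : Int) :
    ∀ (fuel : Nat) (heap : List (Int × Int × Int)) (vis ch : PySem.Set (Int × Int)) (res : List (Int × Int)),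
      pvInv A B n heap vis ch →
      nbestcLoop A B n fuel res heap vis = nbestcAltLoop A B n fuel ch res := by
  intro fuel
  induction fuel with
  | zero => intro heap vis ch res _; rfl
  | succ fuel ih =>
    intro heap vis ch res hInv
    obtain ⟨hheap, hvis, hnd, hbnd⟩ := hInv
    have hmin : pyMinTriple (candList A B n ch) = pyMinTriple heap := by
      apply pyMinTriple_congr
      rintro ⟨s, x, y⟩
      rw [mem_candList A B n ch hbnd, hheap]
    cases hp : pyMinTriple heap with
    | none =>
      have hpc : pyMinTriple (candList A B n ch) = none := hmin.trans hp
      simp only [nbestcLoop, nbestcAltLoop, hp, hpc]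
    | some m =>
      obtain ⟨s, i, j⟩ := m
      have hpc : pyMinTriple (candList A B n ch) = some (s, i, j) := hmin.trans hp
      have hm : (s, i, j) ∈ heap := (pyMinTriple_eq_some hp).1
      obtain ⟨hf, hs⟩ := (hheap s i j).mp hm
      simp only [nbestcLoop, nbestcAltLoop, hp, hpc]
      apply ih
      -- re-establish the invariant for the successor states
      have hndheap : heap.Nodup := hnd.of_map
      have hcf : ∀ (v : PySem.Set (Int × Int)) (z : Int × Int),
          (!(PySem.Set.contains v z)) = true ↔ z ∉ v := by
        intro v z; simp only [Bool.not_eq_true', contains_false]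
      set Q1 : Bool := decide (i + 1 < n) && !(PySem.Set.contains vis (i + 1, j)) with hQ1
      set V2 : PySem.Set (Int × Int) := if Q1 then PySem.Set.add vis (i + 1, j) else vis with hV2
      set Q2 : Bool := decide (j + 1 < n) && !(PySem.Set.contains V2 (i, j + 1)) with hQ2
      set H1 : List (Int × Int × Int) := heap.erase (s, i, j) with hH1
      set t1 : Int × Int × Int := (PySem.List.pyGetD A (i + 1) 0 + PySem.List.pyGetD B j 0, i + 1, j) with ht1
      set t2 : Int × Int × Int := (PySem.List.pyGetD A i 0 + PySem.List.pyGetD B (j + 1) 0, i, j + 1) with ht2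
      set H2 : List (Int × Int × Int) := if Q1 then H1 ++ [t1] else H1 with hH2
      set H3 : List (Int × Int × Int) := if Q2 then H2 ++ [t2] else H2 with hH3
      set V3 : PySem.Set (Int × Int) := if Q2 then PySem.Set.add V2 (i, j + 1) else V2 with hV3
      have hq1P : Q1 = true ↔ (i + 1 < n ∧ (i + 1, j) ∉ ch ∧ ¬ pvFrontier n ch (i + 1) j) := by
        rw [hQ1]
        simp only [Bool.and_eq_true, decide_eq_true_eq, hcf, hvis]
        tauto
      have hmemV2 : ∀ x y, (x, y) ∈ V2 ↔ ((x, y) ∈ vis ∨ (Q1 = true ∧ x = i + 1 ∧ y = j)) := by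
        intro x y
        rw [hV2]
        rcases Bool.eq_false_or_eq_true Q1 with h1 | h1 <;>
          simp [h1, PySem.Set.mem_add, Prod.mk.injEq] <;> tauto
      have hq2P : Q2 = true ↔ (j + 1 < n ∧ (i, j + 1) ∉ ch ∧ ¬ pvFrontier n ch i (j + 1)) := by
        rw [hQ2]
        have hij : ¬((i : Int) = i + 1) := by omega
        simp only [Bool.and_eq_true, decide_eq_true_eq, hcf, hmemV2, hvis, hij, false_and,
          and_false, or_false]
        tauto
      have hmemV3 : ∀ x y, (x, y) ∈ V3 ↔
          ((x, y) ∈ vis ∨ (Q1 = true ∧ x = i + 1 ∧ y = j) ∨ (Q2 = true ∧ x = i ∧ y = j + 1)) := by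
        intro x y
        rw [hV3]
        rcases Bool.eq_false_or_eq_true Q2 with h2 | h2 <;>
          simp [h2, PySem.Set.mem_add, Prod.mk.injEq, hmemV2] <;> tauto
      have hmemH1 : ∀ s' x y, (s', x, y) ∈ H1 ↔ ((s', x, y) ∈ heap ∧ ¬(x = i ∧ y = j)) := by
        intro s' x y
        rw [hH1, List.Nodup.mem_erase_iff hndheap]
        constructor
        · rintro ⟨hne, hmem'⟩
          refine ⟨hmem', ?_⟩
          rintro ⟨rfl, rfl⟩
          obtain ⟨_, hs'⟩ := (hheap s' x y).mp hmem'
          exact hne (by rw [hs, hs'])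
        · rintro ⟨hmem', hne⟩
          refine ⟨?_, hmem'⟩
          intro he
          injection he with e1 e2
          injection e2 with e2 e3
          exact hne ⟨e2, e3⟩
      have hmemH2 : ∀ s' x y, (s', x, y) ∈ H2 ↔
          (((s', x, y) ∈ heap ∧ ¬(x = i ∧ y = j)) ∨ (Q1 = true ∧ (s', x, y) = t1)) := by
        intro s' x y
        rw [hH2]
        rcases Bool.eq_false_or_eq_true Q1 with h1 | h1 <;>
          simp [h1, List.mem_append, hmemH1 s' x y] <;> tauto
      have hmemH3 : ∀ s' x y, (s', x, y) ∈ H3 ↔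
          (((s', x, y) ∈ heap ∧ ¬(x = i ∧ y = j)) ∨ (Q1 = true ∧ (s', x, y) = t1) ∨
            (Q2 = true ∧ (s', x, y) = t2)) := by
        intro s' x y
        rw [hH3]
        rcases Bool.eq_false_or_eq_true Q2 with h2 | h2 <;>
          simp [h2, List.mem_append, hmemH2 s' x y] <;> tauto
      have hnotcell : ∀ x y, ¬ pvFrontier n ch x y →
          (x, y) ∉ heap.map (fun t => (t.2.1, t.2.2)) := by
        intro x y hnF hmem'
        obtain ⟨⟨s', x', y'⟩, ht, hce⟩ := List.mem_map.mp hmem'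
        injection hce with e1 e2
        subst e1; subst e2
        exact hnF ((hheap s' x' y').mp ht).1
      refine ⟨?_, ?_, ?_, ?_⟩
      · intro s' x y
        rw [hmemH3 s' x y, frontier_step n ch i j x y hf]
        constructor
        · rintro (⟨hmem', hne⟩ | ⟨hq, heq⟩ | ⟨hq, heq⟩)
          · obtain ⟨hFxy, hs'⟩ := (hheap s' x y).mp hmem'
            refine ⟨Or.inl ⟨hFxy, ?_⟩, hs'⟩
            intro he
            injection he with e1 e2
            exact hne ⟨e1, e2⟩
          · rw [ht1] at heq
            injection heq with e1 e2
            injection e2 with e2 e3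
            subst e1; subst e2; subst e3
            obtain ⟨hn1, hnc, hnF⟩ := hq1P.mp hq
            exact ⟨Or.inr (Or.inl ⟨rfl, hn1, hnc, hnF⟩), rfl⟩
          · rw [ht2] at heq
            injection heq with e1 e2
            injection e2 with e2 e3
            subst e1; subst e2; subst e3
            obtain ⟨hn1, hnc, hnF⟩ := hq2P.mp hq
            exact ⟨Or.inr (Or.inr ⟨rfl, hn1, hnc, hnF⟩), rfl⟩
        · rintro ⟨hF' , hs'⟩
          rcases hF' with ⟨hFxy, hne⟩ | ⟨heq, h1, h2, h3⟩ | ⟨heq, h1, h2, h3⟩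
          · refine Or.inl ⟨(hheap s' x y).mpr ⟨hFxy, hs'⟩, ?_⟩
            rintro ⟨rfl, rfl⟩
            exact hne rfl
          · injection heq with e1 e2
            subst e1; subst e2
            refine Or.inr (Or.inl ⟨hq1P.mpr ⟨h1, h2, h3⟩, ?_⟩)
            rw [ht1, hs']
          · injection heq with e1 e2
            subst e1; subst e2
            refine Or.inr (Or.inr ⟨hq2P.mpr ⟨h1, h2, h3⟩, ?_⟩)
            rw [ht2, hs']
      · intro x y
        rw [hmemV3 x y, PySem.Set.mem_add, frontier_step n ch i j x y hf, hvis x y]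
        constructor
        · rintro ((hch | hFxy) | ⟨hq, rfl, rfl⟩ | ⟨hq, rfl, rfl⟩)
          · exact Or.inl (Or.inl hch)
          · by_cases hxy : x = i ∧ y = j
            · exact Or.inl (Or.inr (by simp [Prod.mk.injEq, hxy.1, hxy.2]))
            · refine Or.inr (Or.inl ⟨hFxy, ?_⟩)
              rintro he
              injection he with e1 e2
              exact hxy ⟨e1, e2⟩
          · obtain ⟨hn1, hnc, hnF⟩ := hq1P.mp hq
            exact Or.inr (Or.inr (Or.inl ⟨rfl, hn1, hnc, hnF⟩))
          · obtain ⟨hn1, hnc, hnF⟩ := hq2P.mp hq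
            exact Or.inr (Or.inr (Or.inr ⟨rfl, hn1, hnc, hnF⟩))
        · rintro ((hch | heq) | ⟨hFxy, hne⟩ | ⟨heq, h1, h2, h3⟩ | ⟨heq, h1, h2, h3⟩)
          · exact Or.inl (Or.inl hch)
          · injection heq with e1 e2
            subst e1; subst e2
            exact Or.inl (Or.inr hf)
          · exact Or.inl (Or.inr hFxy)
          · injection heq with e1 e2
            subst e1; subst e2
            exact Or.inr (Or.inl ⟨hq1P.mpr ⟨h1, h2, h3⟩, rfl, rfl⟩)
          · injection heq with e1 e2
            subst e1; subst e2
            exact Or.inr (Or.inr ⟨hq2P.mpr ⟨h1, h2, h3⟩, rfl, rfl⟩)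
      · -- Nodup of the cells of H3
        have hsub1 : H1.Sublist heap := hH1 ▸ List.erase_sublist
        have hnd1 : (H1.map (fun t => (t.2.1, t.2.2))).Nodup := ((hsub1.map _).nodup) hnd
        have hsubc1 : ∀ z, z ∈ H1.map (fun t : Int × Int × Int => (t.2.1, t.2.2)) →
            z ∈ heap.map (fun t => (t.2.1, t.2.2)) := fun z hz => (hsub1.map _).subset hz
        rw [hH3, hH2]
        rcases Bool.eq_false_or_eq_true Q1 with h1 | h1 <;>
          rcases Bool.eq_false_or_eq_true Q2 with h2 | h2 <;>
            simp only [h1, h2, Bool.false_eq_true, if_false, if_true]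
        · -- both pushed
          obtain ⟨hn1a, hnca, hnFa⟩ := hq1P.mp h1
          obtain ⟨hn1b, hncb, hnFb⟩ := hq2P.mp h2
          rw [List.map_append, List.map_append]
          simp only [List.nodup_append, List.map_cons, List.map_nil, ht1, ht2]
          refine ⟨⟨hnd1, by simp, ?_⟩, by simp, ?_⟩
          · intro z hz w hw
            simp only [List.mem_cons, List.not_mem_nil, or_false] at hw
            subst hw
            rintro rfl
            exact hnotcell (i + 1) j hnFa (hsubc1 _ hz)
          · intro z hz w hw
            simp only [List.mem_cons, List.not_mem_nil, or_false] at hw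
            subst hw
            rintro rfl
            rcases List.mem_append.mp hz with hz' | hz'
            · exact hnotcell i (j + 1) hnFb (hsubc1 _ hz')
            · simp only [List.map_cons, List.map_nil, List.mem_cons, List.not_mem_nil,
                or_false, ht1] at hz'
              injection hz' with e1 e2
              omega
        · -- only t1 pushed
          obtain ⟨hn1, hnc, hnF⟩ := hq1P.mp h1
          rw [List.map_append]
          simp only [List.nodup_append, List.map_cons, List.map_nil, ht1]
          refine ⟨hnd1, by simp, ?_⟩
          intro z hz w hw
          simp only [List.mem_cons, List.not_mem_nil, or_false] at hw
          subst hw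
          rintro rfl
          exact hnotcell (i + 1) j hnF (hsubc1 _ hz)
        · -- only t2 pushed
          obtain ⟨hn1, hnc, hnF⟩ := hq2P.mp h2
          rw [List.map_append]
          simp only [List.nodup_append, List.map_cons, List.map_nil, ht2]
          refine ⟨hnd1, by simp, ?_⟩
          intro z hz w hw
          simp only [List.mem_cons, List.not_mem_nil, or_false] at hw
          subst hw
          rintro rfl
          exact hnotcell i (j + 1) hnF (hsubc1 _ hz)
        · exact hnd1
      · intro p hp
        rcases (PySem.Set.mem_add ch (i, j) p).mp hp with hp' | rfl
        · exact hbnd p hp'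
        · obtain ⟨b1, b2, b3, b4, _, _⟩ := hf
          exact ⟨b1, b2, b3, b4⟩

lemma init_inv (A B : List Int) :
    pvInv A B (A.length : Int)
      ((PySem.List.pyRange 0 (A.length : Int) 1).map
        (fun j => (PySem.List.pyGetD A 0 0 + PySem.List.pyGetD B j 0, (0 : Int), j)))
      (PySem.Set.ofList ((PySem.List.pyRange 0 (A.length : Int) 1).map (fun j => ((0 : Int), j))))
      PySem.Set.empty := by
  refine ⟨?_, ?_, ?_, ?_⟩
  · intro s x y
    simp only [List.mem_map, PySem.List.mem_pyRange_one]
    constructor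
    · rintro ⟨j', ⟨h0, h1⟩, he⟩
      injection he with e1 e2
      injection e2 with e2 e3
      subst e1; subst e2; subst e3
      exact ⟨⟨le_refl 0, by omega, h0, h1, List.not_mem_nil, Or.inl rfl⟩, rfl⟩
    · rintro ⟨⟨hx0, hxn, hy0, hyn, _, hen⟩, rfl⟩
      rcases hen with rfl | h | h
      · exact ⟨y, ⟨hy0, hyn⟩, rfl⟩
      · exact absurd h List.not_mem_nil
      · exact absurd h List.not_mem_nil
  · intro x y
    simp only [PySem.Set.mem_ofList, List.mem_map, PySem.List.mem_pyRange_one]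
    constructor
    · rintro ⟨j', ⟨h0, h1⟩, he⟩
      injection he with e1 e2
      subst e1; subst e2
      exact Or.inr ⟨le_refl 0, by omega, h0, h1, List.not_mem_nil, Or.inl rfl⟩
    · rintro (h | ⟨hx0, hxn, hy0, hyn, _, hen⟩)
      · exact absurd h List.not_mem_nil
      · rcases hen with rfl | h | h
        · exact ⟨y, ⟨hy0, hyn⟩, rfl⟩
        · exact absurd h List.not_mem_nil
        · exact absurd h List.not_mem_nil
  · rw [List.map_map]
    refine List.Nodup.map ?_ (PySem.List.nodup_pyRange_one _ _)
    intro a b h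
    simpa using congrArg (fun p : Int × Int => p.2) h
  · intro p hp
    exact absurd hp List.not_mem_nil

-- ===== VERDICT (by name: the statement is the Claim_ definition above) =====
theorem nbestc_spec : Claim_equal_nbestc := by
  intro A B _ _
  unfold Spec_nbestc nbestc nbestc_alt
  exact loop_eq A B _ _ _ _ _ _ (init_inv A B)
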